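-- pv_equiv track=rewrite | github.com/Notta2001/Daily_Code_Challenge | 00295_MaximumValueOfKCoinsFromPiles_15042023.py | maxValueOfCoin
-- ===== SOURCE A (Python) =====
-- from typing import List
--
-- def maxValueOfCoin(piles: List[List[int]], k: int) -> int:
--     n = len(piles)
--     dp = [[0 for _ in range(k + 1)] for _ in range(n + 1)]
--     for i in range(1, n + 1):
--         for coins in range(0, k + 1):
--             currSum = 0
--             for currCoins in range(0, min(len(piles[i-1]), coins) + 1):
--                 if currCoins > 0:
--                     currSum += piles[i-1][currCoins - 1]
--                 dp[i][coins] = max(dp[i][coins], dp[i-1][coins - currCoins] + currSum)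
--     return dp[n][k]
-- ===== SOURCE B (Python) =====
-- from typing import List
--
-- def maxValueOfCoin(piles: List[List[int]], k: int) -> int:
--     memo = {}
--
--     def rec(i, coins):
--         if i == 0:
--             return 0
--         key = (i, coins)
--         if key in memo:
--             return memo[key]
--         pile = piles[i - 1]
--         best = rec(i - 1, coins)
--         currSum = 0
--         for currCoins in range(1, min(len(pile), coins) + 1):
--             currSum += pile[currCoins - 1]
--             best = max(best, rec(i - 1, coins - currCoins) + currSum)
--         memo[key] = best
--         return best
--
--     return rec(len(piles), k)
-- ===== Notes on version B (the rewrite author's own statement) =====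
-- stated objective: alternative
-- what changed: Replaces the bottom-up (n+1)x(k+1) table with in-place cell updates by a top-down memoized recursion rec(i, coins) over a (i, coins)-keyed dict, which only visits reachable states.
import Mathlib
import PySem

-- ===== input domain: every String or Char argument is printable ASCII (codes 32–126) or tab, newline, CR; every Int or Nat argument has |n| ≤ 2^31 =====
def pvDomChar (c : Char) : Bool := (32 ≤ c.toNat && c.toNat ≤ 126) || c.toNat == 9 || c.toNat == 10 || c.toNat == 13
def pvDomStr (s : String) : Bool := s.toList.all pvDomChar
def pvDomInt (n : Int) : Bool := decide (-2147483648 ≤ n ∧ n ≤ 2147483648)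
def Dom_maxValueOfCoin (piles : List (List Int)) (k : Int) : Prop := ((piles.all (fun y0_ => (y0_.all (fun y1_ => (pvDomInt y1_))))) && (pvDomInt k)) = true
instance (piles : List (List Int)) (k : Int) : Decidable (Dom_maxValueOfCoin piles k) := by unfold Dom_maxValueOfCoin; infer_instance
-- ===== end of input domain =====

-- B changes the decomposition: top-down memoized recursion over (i, coins) instead of A's
-- bottom-up (n+1)×(k+1) table; equal return value proved for all k ≥ 0 (A raises IndexError for k < 0).

-- ===== PORT A =====
-- dp[i][coins] read / dp[i][coins] = v.  Wherever A executes these, i and coins are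
-- drawn from range(...) so they are nonnegative and in range: the .toNat conversions
-- in pvSet2 are exact there, and pvGet2's defaults are never hit (pyGetD = Python indexing).
def pvGet2 (dp : List (List Int)) (i j : Int) : Int :=
  PySem.List.pyGetD (PySem.List.pyGetD dp i []) j 0

def pvSet2 (dp : List (List Int)) (i j : Int) (v : Int) : List (List Int) :=
  dp.set i.toNat ((dp.getD i.toNat []).set j.toNat v)

-- the innermost 'for currCoins in range(0, min(len(piles[i-1]), coins) + 1)' loop
def aInner (pile : List Int) (i coins : Int) (dp : List (List Int)) : List (List Int) :=
  ((PySem.List.pyRange 0 (min (pile.length : Int) coins + 1) 1).foldl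
    (fun (st : List (List Int) × Int) currCoins =>
      let currSum := if currCoins > 0 then st.2 + PySem.List.pyGetD pile (currCoins - 1) 0 else st.2
      (pvSet2 st.1 i coins
        (max (pvGet2 st.1 i coins) (pvGet2 st.1 (i - 1) (coins - currCoins) + currSum)),
       currSum))
    (dp, 0)).1

-- the 'for coins in range(0, k + 1)' loop
def aMiddle (piles : List (List Int)) (k i : Int) (dp : List (List Int)) : List (List Int) :=
  (PySem.List.pyRange 0 (k + 1) 1).foldl
    (fun dp coins => aInner (PySem.List.pyGetD piles (i - 1) []) i coins dp) dp

def maxValueOfCoin (piles : List (List Int)) (k : Int) : Int :=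
  let n := piles.length
  let dp0 : List (List Int) :=
    (PySem.List.pyRange 0 ((n : Int) + 1) 1).map
      (fun _ => (PySem.List.pyRange 0 (k + 1) 1).map (fun _ => (0 : Int)))
  let dp := (PySem.List.pyRange 1 ((n : Int) + 1) 1).foldl (fun dp i => aMiddle piles k i dp) dp0
  pvGet2 dp (n : Int) k   -- dp[n][k]; in range exactly when 0 ≤ k (= Pre_)

-- ===== PORT B =====
-- rec(i, coins): Python's memoized inner function; the dict is threaded through the fold.
-- piles[i-1] with 1 ≤ i ≤ len(piles) is piles.getD (i-1) (exact: index nonnegative, in range).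
def bRec (piles : List (List Int)) : Nat → Int → PySem.Dict (Int × Int) Int → Int × PySem.Dict (Int × Int) Int
  | 0, _, memo => (0, memo)
  | i + 1, coins, memo =>
    match memo.get? ((i : Int) + 1, coins) with
    | some v => (v, memo)
    | none =>
      let pile := piles.getD i []
      let r0 := bRec piles i coins memo
      let st := (PySem.List.pyRange 1 (min (pile.length : Int) coins + 1) 1).foldl
        (fun (st : Int × Int × PySem.Dict (Int × Int) Int) t =>
          let s := st.2.1 + PySem.List.pyGetD pile (t - 1) 0
          let r := bRec piles i (coins - t) st.2.2
          (max st.1 (r.1 + s), s, r.2))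
        (r0.1, 0, r0.2)
      (st.1, st.2.2.insert ((i : Int) + 1, coins) st.1)

def maxValueOfCoin_alt (piles : List (List Int)) (k : Int) : Int :=
  (bRec piles piles.length k PySem.Dict.empty).1

-- ===== PRECONDITION & SPEC =====
-- Pre_ excludes exactly the inputs where A raises: for k < 0 every dp row is empty and
-- the final dp[n][k] raises IndexError.
def Pre_maxValueOfCoin (piles : List (List Int)) (k : Int) : Prop := 0 ≤ k
instance (piles : List (List Int)) (k : Int) : Decidable (Pre_maxValueOfCoin piles k) := by
  unfold Pre_maxValueOfCoin; infer_instance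

def pvWitness_maxValueOfCoin : List (List Int) × Int := ([[1, 2, 3], [5]], 2)

def Spec_maxValueOfCoin (piles : List (List Int)) (k : Int) (out : Int) : Prop := out = maxValueOfCoin_alt piles k
instance (piles : List (List Int)) (k : Int) (out : Int) : Decidable (Spec_maxValueOfCoin piles k out) := by unfold Spec_maxValueOfCoin; infer_instance

-- ===== CLAIM (what is proved, stated in full; the proofs are below) =====
def Claim_equal_maxValueOfCoin : Prop := ∀ (piles : List (List Int)) (k : Int), Dom_maxValueOfCoin piles k → Pre_maxValueOfCoin piles k → Spec_maxValueOfCoin piles k (maxValueOfCoin piles k)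


-- ===== LEMMAS AND PROOFS =====

-- Pure specification both ports are proved equal to:
-- pvG piles i c = best value obtainable from the first i piles with budget c.
def pstep (pile : List Int) (f : Int → Int) (st : Int × Int) (t : Int) : Int × Int :=
  let s := st.2 + PySem.List.pyGetD pile (t - 1) 0
  (max st.1 (f t + s), s)

def pvG (piles : List (List Int)) : Nat → Int → Int
  | 0, _ => 0
  | i + 1, c =>
    let pile := piles.getD i []
    ((PySem.List.pyRange 1 (min (pile.length : Int) c + 1) 1).foldl
      (pstep pile (fun t => pvG piles i (c - t))) (pvG piles i c, 0)).1

lemma fst_le_foldl_pstep (pile : List Int) (f : Int → Int) :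
    ∀ (l : List Int) (st : Int × Int), st.1 ≤ (l.foldl (pstep pile f) st).1 := by
  intro l
  induction l with
  | nil => intro st; simp
  | cons t l ih =>
    intro st
    refine le_trans ?_ (ih _)
    simp [pstep]

lemma pvG_nonneg (piles : List (List Int)) : ∀ (i : Nat) (c : Int), 0 ≤ pvG piles i c := by
  intro i
  induction i with
  | zero => intro c; simp [pvG]
  | succ i ih =>
    intro c
    refine le_trans (ih c) ?_
    exact fst_le_foldl_pstep _ _ _ (pvG piles i c, 0)

-- memo invariant for B: every stored value is the spec value of its key
def GoodMemo (piles : List (List Int)) (memo : PySem.Dict (Int × Int) Int) : Prop :=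
  ∀ (j : Nat) (c v : Int), memo.get? ((j : Int), c) = some v → v = pvG piles j c

lemma goodMemo_insert (piles : List (List Int)) (memo : PySem.Dict (Int × Int) Int)
    (i : Nat) (c : Int) (hG : GoodMemo piles memo) :
    GoodMemo piles (memo.insert ((i : Int) + 1, c) (pvG piles (i + 1) c)) := by
  intro j c' v hget
  rw [PySem.Dict.get?_insert] at hget
  split at hget
  · rename_i heq
    have h1 : (j : Int) = (i : Int) + 1 := congrArg Prod.fst heq
    have h2 : c' = c := congrArg Prod.snd heq
    have hj : j = i + 1 := by omega
    subst hj h2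
    exact (Option.some.injEq _ _).mp hget.symm ▸ (by injection hget with h; omega)
  · exact hG j c' v hget

lemma bRec_correct (piles : List (List Int)) :
    ∀ (i : Nat) (c : Int) (memo : PySem.Dict (Int × Int) Int), GoodMemo piles memo →
      (bRec piles i c memo).1 = pvG piles i c ∧ GoodMemo piles (bRec piles i c memo).2 := by
  intro i
  induction i with
  | zero => intro c memo hG; exact ⟨by simp [bRec, pvG], by simpa [bRec] using hG⟩
  | succ i ih =>
    intro c memo hG
    cases hmem : memo.get? ((i : Int) + 1, c) with
    | some v =>
      have hv : v = pvG piles (i + 1) c := by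
        have := hG (i + 1) c v (by push_cast; exact hmem)
        exact this
      exact ⟨by simp [bRec, hmem, hv], by simp [bRec, hmem]; exact hG⟩
    | none =>
      have h0 := ih c memo hG
      -- the coin loop: threading the memo through is invisible in the first two components
      have inner : ∀ (l : List Int) (b s : Int) (m : PySem.Dict (Int × Int) Int), GoodMemo piles m →
          (l.foldl (fun (st : Int × Int × PySem.Dict (Int × Int) Int) t =>
              (max st.1 ((bRec piles i (c - t) st.2.2).1 + (st.2.1 + PySem.List.pyGetD (piles.getD i []) (t - 1) 0)),
               st.2.1 + PySem.List.pyGetD (piles.getD i []) (t - 1) 0,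
               (bRec piles i (c - t) st.2.2).2)) (b, s, m)).1
            = (l.foldl (pstep (piles.getD i []) (fun t => pvG piles i (c - t))) (b, s)).1
          ∧ GoodMemo piles ((l.foldl (fun (st : Int × Int × PySem.Dict (Int × Int) Int) t =>
              (max st.1 ((bRec piles i (c - t) st.2.2).1 + (st.2.1 + PySem.List.pyGetD (piles.getD i []) (t - 1) 0)),
               st.2.1 + PySem.List.pyGetD (piles.getD i []) (t - 1) 0,
               (bRec piles i (c - t) st.2.2).2)) (b, s, m)).2.2) := by
        intro l
        induction l with
        | nil => intro b s m hm; exact ⟨rfl, hm⟩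
        | cons t l ihl =>
          intro b s m hm
          have hr := ih (c - t) m hm
          simp only [List.foldl_cons]
          rw [hr.1]
          exact ihl _ _ _ hr.2
      have hmain := inner (PySem.List.pyRange 1 (min ((piles.getD i []).length : Int) c + 1) 1)
          (bRec piles i c memo).1 0 (bRec piles i c memo).2 h0.2
      constructor
      · show (bRec piles (i + 1) c memo).1 = _
        simp only [bRec, hmem]
        rw [hmain.1, h0.1]
        rfl
      · show GoodMemo piles (bRec piles (i + 1) c memo).2
        simp only [bRec, hmem]
        have hbest : ((PySem.List.pyRange 1 (min ((piles.getD i []).length : Int) c + 1) 1).foldl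
            (fun (st : Int × Int × PySem.Dict (Int × Int) Int) t =>
              (max st.1 ((bRec piles i (c - t) st.2.2).1 + (st.2.1 + PySem.List.pyGetD (piles.getD i []) (t - 1) 0)),
               st.2.1 + PySem.List.pyGetD (piles.getD i []) (t - 1) 0,
               (bRec piles i (c - t) st.2.2).2)) ((bRec piles i c memo).1, 0, (bRec piles i c memo).2)).1
            = pvG piles (i + 1) c := by
          rw [hmain.1, h0.1]; rfl
        rw [hbest]
        exact goodMemo_insert piles _ i c hmain.2

lemma alt_eq_pvG (piles : List (List Int)) (k : Int) :
    maxValueOfCoin_alt piles k = pvG piles piles.length k := by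
  have h := bRec_correct piles piles.length k PySem.Dict.empty
      (by intro j c v hget; simp [PySem.Dict.get?_empty] at hget)
  exact h.1

-- ---- A-side: dp-cell access in Nat-indexed form ----
def cellv (dp : List (List Int)) (a : Nat) (y : Int) : Int := (dp.getD a []).getD y.toNat 0
def setCell (dp : List (List Int)) (a : Nat) (y : Int) (v : Int) : List (List Int) :=
  dp.set a ((dp.getD a []).set y.toNat v)

lemma pvGet2_eq_cell (dp : List (List Int)) (i j : Int) (hi : 0 ≤ i) (hj : 0 ≤ j) :
    pvGet2 dp i j = cellv dp i.toNat j := by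
  simp [pvGet2, cellv, PySem.List.pyGetD_of_nonneg _ _ hi, PySem.List.pyGetD_of_nonneg _ _ hj]

lemma pvSet2_eq_setCell (dp : List (List Int)) (i j : Int) (v : Int) :
    pvSet2 dp i j v = setCell dp i.toNat j v := rfl

lemma row_setCell (dp : List (List Int)) (a : Nat) (y : Int) (v : Int) (a' : Nat) :
    (setCell dp a y v).getD a' [] =
      if a' = a ∧ a < dp.length then (dp.getD a []).set y.toNat v else dp.getD a' [] := by
  by_cases hlen : a < dp.length
  · by_cases ha : a' = a
    · subst ha
      rw [if_pos ⟨rfl, hlen⟩, setCell, List.getD_eq_getElem?_getD, List.getElem?_set_self hlen]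
      rfl
    · rw [if_neg (fun hh => ha hh.1), setCell, List.getD_eq_getElem?_getD,
          List.getElem?_set_ne (fun hh => ha hh.symm), ← List.getD_eq_getElem?_getD]
  · rw [setCell, List.set_eq_of_length_le (by omega), if_neg (fun hh => hlen hh.2)]

lemma length_setCell (dp : List (List Int)) (a : Nat) (y : Int) (v : Int) :
    (setCell dp a y v).length = dp.length := by simp [setCell]

lemma cell_setCell_self (dp : List (List Int)) (a : Nat) (y : Int) (v : Int)
    (ha : a < dp.length) (hy : y.toNat < (dp.getD a []).length) :
    cellv (setCell dp a y v) a y = v := by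
  unfold cellv
  rw [row_setCell, if_pos ⟨rfl, ha⟩, List.getD_eq_getElem?_getD, List.getElem?_set_self hy]
  rfl

lemma cell_setCell_ne (dp : List (List Int)) (a : Nat) (y : Int) (v : Int) (a' : Nat) (y' : Int)
    (h : a' ≠ a ∨ (0 ≤ y' ∧ 0 ≤ y ∧ y' ≠ y)) :
    cellv (setCell dp a y v) a' y' = cellv dp a' y' := by
  unfold cellv
  rw [row_setCell]
  rcases h with h | ⟨h1, h2, h3⟩
  · rw [if_neg (fun hh => h hh.1)]
  · by_cases hin : a' = a ∧ a < dp.length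
    · rw [if_pos hin, List.getD_eq_getElem?_getD,
          List.getElem?_set_ne (show y.toNat ≠ y'.toNat by omega), ← List.getD_eq_getElem?_getD,
          hin.1]
    · rw [if_neg hin]

lemma setCell_setCell (dp : List (List Int)) (a : Nat) (y : Int) (v w : Int)
    (ha : a < dp.length) :
    setCell (setCell dp a y v) a y w = setCell dp a y w := by
  unfold setCell
  rw [show (dp.set a ((dp.getD a []).set y.toNat v)).getD a [] = (dp.getD a []).set y.toNat v from by
        rw [List.getD_eq_getElem?_getD, List.getElem?_set_self ha]; rfl]
  simp [List.set_set]

def ShapeDP (dp : List (List Int)) (n K : Nat) : Prop :=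
  dp.length = n + 1 ∧ ∀ a : Nat, a < n + 1 → (dp.getD a []).length = K + 1

lemma shape_setCell (dp : List (List Int)) (n K a : Nat) (y : Int) (v : Int)
    (h : ShapeDP dp n K) : ShapeDP (setCell dp a y v) n K := by
  refine ⟨by simp [length_setCell, h.1], ?_⟩
  intro a' ha'
  rw [row_setCell]
  split
  · rename_i hcond
    rw [List.length_set]
    exact hcond.1 ▸ h.2 a' ha'
  · exact h.2 a' ha'

-- the innermost loop over range(1, m+1), once the t = 0 iteration has installed b in the cell:
-- only cell (i1, c) changes, and it follows the pure pstep fold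
lemma aInner_loop (pile : List Int) (dp : List (List Int)) (i1 c : Int)
    (hi1 : 1 ≤ i1) (hc : 0 ≤ c)
    (h1 : i1.toNat < dp.length) (h2 : c.toNat < (dp.getD i1.toNat []).length) :
    ∀ (l : List Int), (∀ t ∈ l, 0 < t ∧ t ≤ c) → ∀ (b s : Int),
      l.foldl (fun (st : List (List Int) × Int) currCoins =>
          let currSum := if currCoins > 0 then st.2 + PySem.List.pyGetD pile (currCoins - 1) 0 else st.2
          (pvSet2 st.1 i1 c
            (max (pvGet2 st.1 i1 c) (pvGet2 st.1 (i1 - 1) (c - currCoins) + currSum)), currSum))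
        (pvSet2 dp i1 c b, s)
      = (pvSet2 dp i1 c ((l.foldl (pstep pile (fun t => pvGet2 dp (i1 - 1) (c - t))) (b, s)).1),
         (l.foldl (pstep pile (fun t => pvGet2 dp (i1 - 1) (c - t))) (b, s)).2) := by
  intro l
  induction l with
  | nil => intro _ b s; rfl
  | cons t l ih =>
    intro hmem b s
    obtain ⟨ht0, htc⟩ := hmem t (List.mem_cons_self ..)
    have hget_self : pvGet2 (pvSet2 dp i1 c b) i1 c = b := by
      rw [pvSet2_eq_setCell, pvGet2_eq_cell _ _ _ (by omega) hc]
      exact cell_setCell_self dp i1.toNat c b h1 h2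
    have hget_ne : pvGet2 (pvSet2 dp i1 c b) (i1 - 1) (c - t) = pvGet2 dp (i1 - 1) (c - t) := by
      rw [pvSet2_eq_setCell, pvGet2_eq_cell _ _ _ (by omega) (by omega),
          pvGet2_eq_cell _ _ _ (by omega) (by omega)]
      exact cell_setCell_ne dp i1.toNat c b (i1 - 1).toNat (c - t) (Or.inl (by omega))
    have hset2 : ∀ w, pvSet2 (pvSet2 dp i1 c b) i1 c w = pvSet2 dp i1 c w := by
      intro w
      rw [pvSet2_eq_setCell, pvSet2_eq_setCell, pvSet2_eq_setCell]
      exact setCell_setCell dp i1.toNat c b w h1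
    simp only [List.foldl_cons, if_pos (show t > 0 from ht0), hget_self, hget_ne, hset2]
    rw [ih (fun x hx => hmem x (List.mem_cons_of_mem _ hx)) _ _]
    rfl

-- one full innermost loop computes exactly the spec value of cell (j+1, c)
lemma aInner_spec (piles : List (List Int)) (k : Int) (hk : 0 ≤ k) (j : Nat)
    (hj : j < piles.length) (cN : Nat) (hck : (cN : Int) ≤ k) (dp : List (List Int))
    (hshape : ShapeDP dp piles.length k.toNat)
    (hrow : ∀ y : Int, 0 ≤ y → y ≤ k → cellv dp j y = pvG piles j y)
    (hzero : cellv dp (j + 1) (cN : Int) = 0) :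
    aInner (PySem.List.pyGetD piles ((1 + (j : Int)) - 1) []) (1 + (j : Int)) (cN : Int) dp
      = setCell dp (j + 1) (cN : Int) (pvG piles (j + 1) (cN : Int)) := by
  have hpile : PySem.List.pyGetD piles ((1 + (j : Int)) - 1) [] = piles.getD j [] := by
    rw [show (1 + (j : Int)) - 1 = (j : Int) by ring,
        PySem.List.pyGetD_of_nonneg _ _ (by positivity), Int.toNat_natCast]
  have hi1n : (1 + (j : Int)).toNat = j + 1 := by omega
  have h1 : (1 + (j : Int)).toNat < dp.length := by rw [hi1n, hshape.1]; omega
  have h2 : ((cN : Int)).toNat < (dp.getD (1 + (j : Int)).toNat []).length := by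
    rw [hi1n, hshape.2 (j + 1) (by omega)]; omega
  set pile := piles.getD j [] with hpdef
  have hm0 : (0 : Int) ≤ min ((pile.length : Int)) (cN : Int) := by
    simp only [le_min_iff]; constructor <;> positivity
  unfold aInner
  rw [hpile]
  rw [PySem.List.pyRange_one_cons (show (0 : Int) < min ((pile.length : Int)) (cN : Int) + 1 by omega)]
  simp only [List.foldl_cons]
  -- the t = 0 iteration
  have hc0 : pvGet2 dp (1 + (j : Int)) (cN : Int) = 0 := by
    rw [pvGet2_eq_cell _ _ _ (by omega) (by positivity), hi1n]; exact hzero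
  have hcj : pvGet2 dp ((1 + (j : Int)) - 1) ((cN : Int) - 0) = pvG piles j (cN : Int) := by
    rw [show (1 + (j : Int)) - 1 = (j : Int) by ring, sub_zero,
        pvGet2_eq_cell _ _ _ (by positivity) (by positivity), Int.toNat_natCast]
    exact hrow _ (by positivity) hck
  rw [if_neg (by omega), hc0, hcj]
  simp only [add_zero]
  rw [max_eq_right (by have := pvG_nonneg piles j (cN : Int); omega)]
  -- the remaining iterations via aInner_loop
  rw [aInner_loop pile dp (1 + (j : Int)) (cN : Int) (by omega) (by positivity) h1 h2 _
      (fun t ht => by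
        rw [PySem.List.mem_pyRange_one] at ht
        constructor
        · omega
        · have : t ≤ min ((pile.length : Int)) (cN : Int) := by omega
          omega)
      (pvG piles j (cN : Int)) 0]
  rw [pvSet2_eq_setCell, hi1n]
  rw [PySem.List.foldl_congr_mem _ _ (pstep pile (fun t => pvG piles j ((cN : Int) - t))) _
      (fun acc t ht => by
        rw [PySem.List.mem_pyRange_one] at ht
        have htc : t ≤ (cN : Int) := by
          have : t ≤ min ((pile.length : Int)) (cN : Int) := by omega
          omega
        simp only [pstep]
        have hget : pvGet2 dp ((1 + (j : Int)) - 1) ((cN : Int) - t) = pvG piles j ((cN : Int) - t) := by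
          rw [show (1 + (j : Int)) - 1 = (j : Int) by ring,
              pvGet2_eq_cell _ _ _ (by positivity) (by omega), Int.toNat_natCast]
          exact hrow _ (by omega) (by omega)
        rw [hget])]
  rfl

-- generic invariant scheme for a fold over List.range
lemma foldl_range_inv {α : Type} (P : Nat → α → Prop) (f : α → Nat → α) :
    ∀ (m : Nat) (s : α), P 0 s → (∀ (jj : Nat) (s : α), jj < m → P jj s → P (jj + 1) (f s jj)) →
      P m ((List.range m).foldl f s) := by
  intro m
  induction m with
  | zero => intro s h _; simpa using h
  | succ m ih =>
    intro s h0 hstep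
    rw [List.range_succ, List.foldl_append]
    exact hstep m _ (by omega) (ih s h0 (fun jj s hjj h => hstep jj s (by omega) h))

-- the two dp invariants
def Pinv (piles : List (List Int)) (k : Int) (j : Nat) (dp : List (List Int)) : Prop :=
  ShapeDP dp piles.length k.toNat
  ∧ (∀ a : Nat, a ≤ j → ∀ y : Int, 0 ≤ y → y ≤ k → cellv dp a y = pvG piles a y)
  ∧ (∀ a : Nat, j < a → ∀ y : Int, 0 ≤ y → y ≤ k → cellv dp a y = 0)

def Qinv (piles : List (List Int)) (k : Int) (j cN : Nat) (dp : List (List Int)) : Prop :=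
  ShapeDP dp piles.length k.toNat
  ∧ (∀ a : Nat, a ≤ j → ∀ y : Int, 0 ≤ y → y ≤ k → cellv dp a y = pvG piles a y)
  ∧ (∀ y : Int, 0 ≤ y → y < (cN : Int) → cellv dp (j + 1) y = pvG piles (j + 1) y)
  ∧ (∀ y : Int, (cN : Int) ≤ y → y ≤ k → cellv dp (j + 1) y = 0)
  ∧ (∀ a : Nat, j + 1 < a → ∀ y : Int, 0 ≤ y → y ≤ k → cellv dp a y = 0)

lemma aMiddle_spec (piles : List (List Int)) (k : Int) (hk : 0 ≤ k) (j : Nat)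
    (hj : j < piles.length) (dp : List (List Int)) (hP : Pinv piles k j dp) :
    Pinv piles k (j + 1) (aMiddle piles k (1 + (j : Int)) dp) := by
  unfold aMiddle
  rw [show k + 1 = ((k.toNat + 1 : Nat) : Int) by omega, PySem.List.pyRange_zero_natCast,
      List.foldl_map]
  have hmain := foldl_range_inv (Qinv piles k j)
    (fun dp cN => aInner (PySem.List.pyGetD piles ((1 + (j : Int)) - 1) []) (1 + (j : Int)) (cN : Int) dp)
    (k.toNat + 1) dp
    (by
      refine ⟨hP.1, hP.2.1, ?_, ?_, ?_⟩
      · intro y hy hy'; omega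
      · intro y _ hy'; exact hP.2.2 (j + 1) (by omega) y (by omega) hy'
      · intro a ha y hy hy'; exact hP.2.2 a (by omega) y hy hy')
    (by
      intro cN dp' hcN hQ
      have hck : (cN : Int) ≤ k := by omega
      show Qinv piles k j (cN + 1)
        (aInner (PySem.List.pyGetD piles ((1 + (j : Int)) - 1) []) (1 + (j : Int)) (cN : Int) dp')
      rw [aInner_spec piles k hk j hj cN hck dp' hQ.1
            (fun y hy hy' => hQ.2.1 j (le_refl j) y hy hy')
            (hQ.2.2.2.1 (cN : Int) (le_refl _) hck)]
      have hlen : j + 1 < dp'.length := by rw [hQ.1.1]; omega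
      have hrowlen : ((cN : Int)).toNat < (dp'.getD (j + 1) []).length := by
        rw [hQ.1.2 (j + 1) (by omega)]; omega
      refine ⟨shape_setCell _ _ _ _ _ _ hQ.1, ?_, ?_, ?_, ?_⟩
      · intro a ha y hy hy'
        rw [cell_setCell_ne _ _ _ _ _ _ (Or.inl (by omega))]
        exact hQ.2.1 a ha y hy hy'
      · intro y hy hy'
        by_cases hyc : y = (cN : Int)
        · subst hyc
          exact cell_setCell_self dp' (j + 1) _ _ hlen hrowlen
        · rw [cell_setCell_ne _ _ _ _ _ _ (Or.inr ⟨hy, by positivity, hyc⟩)]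
          exact hQ.2.2.1 y hy (by omega)
      · intro y hy hy'
        rw [cell_setCell_ne _ _ _ _ _ _ (Or.inr ⟨by omega, by positivity, by omega⟩)]
        exact hQ.2.2.2.1 y (by omega) hy'
      · intro a ha y hy hy'
        rw [cell_setCell_ne _ _ _ _ _ _ (Or.inl (by omega))]
        exact hQ.2.2.2.2 a ha y hy hy')
  exact ⟨hmain.1, fun a ha y hy hy' => by
      rcases Nat.lt_or_ge a (j + 1) with h | h
      · exact hmain.2.1 a (by omega) y hy hy'
      · have haj : a = j + 1 := by omega
        subst haj
        exact hmain.2.2.1 y hy (by omega),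
    fun a ha y hy hy' => hmain.2.2.2.2 a ha y hy hy'⟩

lemma a_eq_pvG (piles : List (List Int)) (k : Int) (hk : 0 ≤ k) :
    maxValueOfCoin piles k = pvG piles piles.length k := by
  have hA : maxValueOfCoin piles k =
      pvGet2
        ((PySem.List.pyRange 1 ((piles.length : Int) + 1) 1).foldl (fun dp i => aMiddle piles k i dp)
          ((PySem.List.pyRange 0 ((piles.length : Int) + 1) 1).map
            (fun _ => (PySem.List.pyRange 0 (k + 1) 1).map (fun _ => (0 : Int)))))
        (piles.length : Int) k := rfl
  rw [hA]
  set n := piles.length with hn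
  set dp0 : List (List Int) :=
    (PySem.List.pyRange 0 ((n : Int) + 1) 1).map
      (fun _ => (PySem.List.pyRange 0 (k + 1) 1).map (fun _ => (0 : Int))) with hdp0
  have hrowz : ∀ a : Nat, dp0.getD a [] = [] ∨
      dp0.getD a [] = (PySem.List.pyRange 0 (k + 1) 1).map (fun _ => (0 : Int)) := by
    intro a
    rw [List.getD_eq_getElem?_getD]
    cases hge : dp0[a]? with
    | none => left; rfl
    | some r =>
      right
      have hr : r ∈ dp0 := List.mem_of_getElem? hge
      rw [hdp0] at hr
      obtain ⟨_, _, hrr⟩ := List.mem_map.mp hr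
      simp [← hrr]
  have hcell0 : ∀ (a : Nat) (y : Int), cellv dp0 a y = 0 := by
    intro a y
    unfold cellv
    rcases hrowz a with h | h <;> rw [h]
    · simp
    · rw [List.getD_eq_getElem?_getD]
      cases hge : ((PySem.List.pyRange 0 (k + 1) 1).map (fun _ => (0 : Int)))[y.toNat]? with
      | none => simp
      | some z =>
        have hz := List.mem_of_getElem? hge
        obtain ⟨_, _, hzz⟩ := List.mem_map.mp hz
        simp [← hzz]
  have hshape0 : ShapeDP dp0 n k.toNat := by
    constructor
    · rw [hdp0, List.length_map, PySem.List.length_pyRange_one]; omega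
    · intro a ha
      rcases hrowz a with h | h
      · exfalso
        have hlen : a < dp0.length := by
          rw [hdp0, List.length_map, PySem.List.length_pyRange_one]; omega
        have hmem : dp0.getD a [] ∈ dp0 := by
          rw [List.getD_eq_getElem?_getD, List.getElem?_eq_getElem hlen]
          simp only [Option.getD_some]
          exact List.getElem_mem hlen
        rw [h, hdp0] at hmem
        obtain ⟨_, _, hrr⟩ := List.mem_map.mp hmem
        have hlen2 : ((PySem.List.pyRange 0 (k + 1) 1).map (fun _ => (0 : Int))).length = 0 := by
          rw [hrr]; rfl
        rw [List.length_map, PySem.List.length_pyRange_one] at hlen2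
        omega
      · rw [h, List.length_map, PySem.List.length_pyRange_one]; omega
  have hP0 : Pinv piles k 0 dp0 := by
    refine ⟨hshape0, ?_, ?_⟩
    · intro a ha y hy hy'
      have : a = 0 := by omega
      subst this
      rw [hcell0]; rfl
    · intro a _ y _ _; exact hcell0 a y
  rw [PySem.List.pyRange_one 1 ((n : Int) + 1),
      show ((n : Int) + 1 - 1).toNat = n by omega, List.foldl_map]
  have hfin := foldl_range_inv (Pinv piles k) _ n dp0 hP0
    (fun jj dp hjj hP => aMiddle_spec piles k hk jj (by omega) dp hP)
  rw [pvGet2_eq_cell _ _ _ (by positivity) hk, Int.toNat_natCast]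
  exact hfin.2.1 n (le_refl n) k hk (le_refl k)

-- ===== VERDICT (by name: the statement is the Claim_ definition above) =====
theorem maxValueOfCoin_spec : Claim_equal_maxValueOfCoin := by
  intro piles k _ hpre
  unfold Spec_maxValueOfCoin
  rw [a_eq_pvG piles k hpre, alt_eq_pvG]
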